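-- pv_equiv track=rewrite | github.com/e-south/dnadesign | src/dnadesign/densegen/src/adapters/sources/background_pool.py | _filter_forbidden_kmers
-- ===== SOURCE A (Python) =====
-- from typing import Iterable
--
-- def _filter_forbidden_kmers(sequences: Iterable[str], kmers: list[str]) -> list[str]:
--     if not kmers:
--         return list(sequences)
--     filtered: list[str] = []
--     for seq in sequences:
--         if any(kmer in seq for kmer in kmers):
--             continue
--         filtered.append(seq)
--     return filtered
-- ===== SOURCE B (Python) =====
-- def _filter_forbidden_kmers(sequences, kmers):
--     # Window scan: hash-set lookups of each window, one pass per (length, position),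
--     # instead of running a substring search for every kmer in every sequence.
--     lengths = sorted({len(k) for k in kmers})
--     kmer_set = set(kmers)
--     out = []
--     for seq in sequences:
--         n = len(seq)
--         hit = any(seq[i:i + L] in kmer_set
--                   for L in lengths for i in range(n - L + 1))
--         if not hit:
--             out.append(seq)
--     return out
-- ===== Notes on version B (the rewrite author's own statement) =====
-- stated objective: faster
-- what changed: Instead of running a substring search of every kmer against every sequence, B builds a hash set of the kmers and the sorted set of their distinct lengths once, then makes a single window scan per sequence, looking each window of a kmer length up in the set.
import Mathlib
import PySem

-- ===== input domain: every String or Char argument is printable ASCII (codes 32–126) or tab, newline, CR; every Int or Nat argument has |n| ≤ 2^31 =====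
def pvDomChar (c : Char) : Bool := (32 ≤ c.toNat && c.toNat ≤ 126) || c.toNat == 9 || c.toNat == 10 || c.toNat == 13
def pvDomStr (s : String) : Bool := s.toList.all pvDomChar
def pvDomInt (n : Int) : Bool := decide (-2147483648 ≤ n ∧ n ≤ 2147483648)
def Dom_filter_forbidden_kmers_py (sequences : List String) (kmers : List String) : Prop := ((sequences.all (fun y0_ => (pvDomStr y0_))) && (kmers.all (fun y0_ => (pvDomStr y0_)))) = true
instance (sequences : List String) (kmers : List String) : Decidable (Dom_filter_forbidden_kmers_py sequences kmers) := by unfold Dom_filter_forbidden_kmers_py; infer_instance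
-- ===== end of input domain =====

-- B replaces A's per-sequence scan over all kmers (a substring search for each kmer)
-- by a single window scan per sequence: every window whose length is a kmer length is
-- looked up in a set of the kmers, removing the per-kmer factor (objective: faster).

-- ===== PORT A =====
def filter_forbidden_kmers_py (sequences : List String) (kmers : List String) : List String :=
  if kmers.isEmpty then sequences
  else
    sequences.foldl (fun filtered seq =>
      if kmers.any (fun kmer => PySem.Str.isIn kmer seq) then filtered
      else filtered ++ [seq]) []

-- ===== PORT B =====
def filter_forbidden_kmers_py_alt (sequences : List String) (kmers : List String) : List String :=
  let lengths : List Int :=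
    PySem.List.sorted (PySem.Set.ofList (kmers.map PySem.Str.len)) (fun x => x) false
  let kmerSet : PySem.Set String := PySem.Set.ofList kmers
  sequences.foldl (fun out seq =>
    let n : Int := PySem.Str.len seq
    let hit := lengths.any (fun L =>
      (PySem.List.pyRange 0 (n - L + 1) 1).any (fun i =>
        PySem.Set.contains kmerSet (PySem.Str.slice seq (some i) (some (i + L)))))
    if hit then out else out ++ [seq]) []

-- ===== PRECONDITION & SPEC =====
def Spec_filter_forbidden_kmers_py (sequences : List String) (kmers : List String) (out : List String) : Prop := out = filter_forbidden_kmers_py_alt sequences kmers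
instance (sequences : List String) (kmers : List String) (out : List String) : Decidable (Spec_filter_forbidden_kmers_py sequences kmers out) := by unfold Spec_filter_forbidden_kmers_py; infer_instance

-- ===== CLAIM (what is proved, stated in full; the proofs are below) =====
def Claim_equal_filter_forbidden_kmers_py : Prop := ∀ (sequences : List String) (kmers : List String), Dom_filter_forbidden_kmers_py sequences kmers → Spec_filter_forbidden_kmers_py sequences kmers (filter_forbidden_kmers_py sequences kmers)

-- ===== LEMMAS AND PROOFS =====

-- A kmer is a substring of seq iff some window of seq of that kmer's length is that kmer:
-- the per-sequence tests of A and B are the same Bool.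
lemma hit_eq (kmers : List String) (seq : String) :
    kmers.any (fun kmer => PySem.Str.isIn kmer seq)
      = (PySem.List.sorted (PySem.Set.ofList (kmers.map PySem.Str.len)) (fun x => x) false).any
          (fun L => (PySem.List.pyRange 0 (PySem.Str.len seq - L + 1) 1).any (fun i =>
            PySem.Set.contains (PySem.Set.ofList kmers)
              (PySem.Str.slice seq (some i) (some (i + L))))) := by
  rw [Bool.eq_iff_iff]
  simp only [List.any_eq_true, PySem.List.mem_sorted, PySem.Set.mem_ofList, List.mem_map,
    PySem.List.mem_pyRange_one, PySem.Set.contains_iff]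
  constructor
  · rintro ⟨k, hk, hin⟩
    -- turn the substring hit into a prefix of a dropped tail
    have hin' : PySem.Chars.isIn k.toList seq.toList = true := by
      simpa using hin
    obtain ⟨j, hpre⟩ := (PySem.Chars.exists_prefix_drop_iff_isIn k.toList seq.toList).mpr hin'
    have hjlen : k.toList.length ≤ seq.toList.length - j := by
      simpa using hpre.length_le
    -- normalise the witness position: j' with j' + |k| ≤ |seq| and k a prefix of drop j'
    obtain ⟨j', hpre', hj2⟩ :
        ∃ j', k.toList <+: seq.toList.drop j' ∧ j' + k.toList.length ≤ seq.toList.length := by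
      rcases Nat.le_total j seq.toList.length with h | h
      · exact ⟨j, hpre, by omega⟩
      · have hk0 : k.toList = [] := by
          have := hpre.length_le
          simp only [List.length_drop] at this
          exact List.eq_nil_of_length_eq_zero (by omega)
        exact ⟨0, by simp [hk0], by simp [hk0]⟩
    refine ⟨PySem.Str.len k, ⟨k, hk, rfl⟩, (j' : Int), ⟨by positivity, ?_⟩, ?_⟩
    · simp only [PySem.Str.len_eq]
      omega
    · have hsl : PySem.Str.slice seq (some (j' : Int)) (some ((j' : Int) + PySem.Str.len k)) = k := by
        apply String.toList_inj.mp
        have hlen : PySem.Str.len k = (k.toList.length : Int) := by simp [pysem]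
        rw [hlen]
        simp only [PySem.Str.slice, PySem.Chars.slice_eq_listSlice, PySem.List.slice_natCast_add,
          String.toList_ofList]
        exact (List.prefix_iff_eq_take.mp hpre').symm
      rw [hsl]
      exact hk
  · rintro ⟨L, ⟨k0, _, hL0⟩, i, ⟨hi0, _⟩, hwmem⟩
    have hL : 0 ≤ L := by
      rw [← hL0]; simp only [PySem.Str.len_eq]; positivity
    refine ⟨_, hwmem, ?_⟩
    rw [PySem.Str.isIn_iff_infix]
    simp only [PySem.Str.slice, PySem.Chars.slice_eq_listSlice, String.toList_ofList]
    rw [PySem.List.slice_toNat _ hi0 (by omega)]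
    exact ((List.take_prefix _ _).isInfix).trans ((List.drop_suffix _ _).isInfix)

-- ===== VERDICT (by name: the statement is the Claim_ definition above) =====
theorem filter_forbidden_kmers_py_spec : Claim_equal_filter_forbidden_kmers_py := by
  intro sequences kmers _
  unfold Spec_filter_forbidden_kmers_py filter_forbidden_kmers_py filter_forbidden_kmers_py_alt
  by_cases hk : kmers = []
  · subst hk
    simp only [List.isEmpty_nil, ite_true, List.map_nil,
      show PySem.List.sorted (PySem.Set.ofList ([] : List Int)) (fun x => x) false
        = ([] : List Int) from rfl,
      List.any_nil, Bool.false_eq_true, if_false]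
    rw [PySem.List.foldl_append_singleton, List.nil_append]
  · rw [if_neg (by simpa using hk)]
    congr 1
    funext out seq
    rw [hit_eq]
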